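-- pv_equiv track=rewrite | github.com/hyeok3011/algorithm | codility/lessons/lession8_leader/dominator/solution.py | solution
-- ===== SOURCE A (Python) =====
-- def solution(A):
--     element_hash_table = {}
--     for i, v in enumerate(A):
--         if v in element_hash_table:
--             element_hash_table[v] += 1
--         else:
--             element_hash_table[v] = 1
--
--         if element_hash_table[v] > len(A) / 2:
--             return i
--
--
--     return -1
-- ===== SOURCE B (Python) =====
-- def solution(A):
--     n = len(A)
--     # Boyer-Moore majority vote: candidate for the dominator
--     cand = None
--     cnt = 0
--     for v in A:
--         if cnt == 0:
--             cand = v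
--             cnt = 1
--         elif v == cand:
--             cnt += 1
--         else:
--             cnt -= 1
--     # verification: candidate must strictly exceed half of the list
--     if cand is None or A.count(cand) <= n / 2:
--         return -1
--     # first index where the candidate's running count exceeds half
--     running = 0
--     for i, v in enumerate(A):
--         if v == cand:
--             running += 1
--             if running > n / 2:
--                 return i
--     return -1
-- ===== Notes on version B (the rewrite author's own statement) =====
-- stated objective: faster
-- what changed: Replaced the incremental hash-table counting (dict of running counts checked at every step) by Boyer-Moore majority voting with O(1) extra space: find the unique possible dominator, verify its total count strictly exceeds n/2 (via list.count, a C-level scan), then one scan tracking only that candidate's running count to locate the first index where it crosses n/2.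
import Mathlib
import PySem

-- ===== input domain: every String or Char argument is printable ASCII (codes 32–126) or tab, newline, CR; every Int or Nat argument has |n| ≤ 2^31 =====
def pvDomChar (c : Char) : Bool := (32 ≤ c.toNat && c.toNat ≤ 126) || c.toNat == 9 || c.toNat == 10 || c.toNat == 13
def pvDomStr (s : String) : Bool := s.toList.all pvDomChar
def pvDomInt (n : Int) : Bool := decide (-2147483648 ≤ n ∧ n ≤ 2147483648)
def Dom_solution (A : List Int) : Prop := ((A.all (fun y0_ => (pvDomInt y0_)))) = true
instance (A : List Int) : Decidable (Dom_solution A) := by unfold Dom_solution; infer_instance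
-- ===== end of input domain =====

-- B replaces A's dict of running counts by Boyer-Moore voting + verification + a candidate-only scan (O(1) extra space); return value proved equal.

-- ===== PORT A =====
-- Python's `element_hash_table[v] > len(A) / 2` compares an int with an exact float n/2
-- (|n| ≤ 2^31 ≪ 2^53), which equals the integer test 2*count > n ported here.
def solutionGo (n : Int) : List Int → Int → PySem.Dict Int Int → Int
  | [], _, _ => -1
  | v :: rest, i, d =>
      let d' := if d.contains v then d.insert v (d.getD v 0 + 1) else d.insert v 1
      if 2 * d'.getD v 0 > n then i else solutionGo n rest (i + 1) d'

def solution (A : List Int) : Int :=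
  solutionGo (A.length : Int) A 0 PySem.Dict.empty

-- ===== PORT B =====
-- Boyer-Moore voting pass: returns the final (candidate, counter) pair.
def bmGo : List Int → Option Int × Int → Option Int × Int
  | [], s => s
  | v :: rest, (cand, cnt) =>
      if cnt = 0 then bmGo rest (some v, 1)
      else if some v = cand then bmGo rest (cand, cnt + 1)
      else bmGo rest (cand, cnt - 1)

-- second scan: first index where the candidate's running count exceeds n/2
-- (`running > n / 2` in Python, exact as 2*running > n on this domain)
def scanGo (n c : Int) : List Int → Int → Int → Int
  | [], _, _ => -1
  | v :: rest, i, running =>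
      if v = c then
        if 2 * (running + 1) > n then i else scanGo n c rest (i + 1) (running + 1)
      else scanGo n c rest (i + 1) running

def solution_alt (A : List Int) : Int :=
  let n : Int := (A.length : Int)
  match (bmGo A (none, 0)).1 with
  | none => -1
  | some c => if 2 * (A.count c : Int) ≤ n then -1 else scanGo n c A 0 0

-- ===== PRECONDITION & SPEC =====
def Spec_solution (A : List Int) (out : Int) : Prop := out = solution_alt A
instance (A : List Int) (out : Int) : Decidable (Spec_solution A out) := by unfold Spec_solution; infer_instance

-- ===== CLAIM (what is proved, stated in full; the proofs are below) =====
def Claim_equal_solution : Prop := ∀ (A : List Int), Dom_solution A → Spec_solution A (solution A)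

-- ===== LEMMAS AND PROOFS =====

-- reference recursion: A's loop with the dict replaced by the processed prefix p
def specA (n : Int) : List Int → List Int → Int → Int
  | [], _, _ => -1
  | v :: rest, p, i =>
      if 2 * ((p.count v : Int) + 1) > n then i else specA n rest (p ++ [v]) (i + 1)

theorem solutionGo_eq_specA (n : Int) (l : List Int) (p : List Int) (i : Int)
    (d : PySem.Dict Int Int) (hd : ∀ v, d.getD v 0 = (p.count v : Int)) :
    solutionGo n l i d = specA n l p i := by
  induction l generalizing p i d with
  | nil => rfl
  | cons v rest ih =>
      have hgd : (if d.contains v then d.insert v (d.getD v 0 + 1) else d.insert v 1)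
          = d.insert v ((p.count v : Int) + 1) := by
        by_cases hc : d.contains v = true
        · simp [hc, hd v]
        · have h0 : d.getD v 0 = 0 := PySem.Dict.getD_of_not_contains d 0 (by simpa using hc)
          have : (p.count v : Int) = 0 := by rw [← hd v, h0]
          simp [hc, this]
      simp only [solutionGo, specA, hgd]
      rw [PySem.Dict.getD_insert_self]
      by_cases hcond : 2 * ((p.count v : Int) + 1) > n
      · simp [hcond]
      · simp only [if_neg hcond]
        exact ih (p ++ [v]) (i + 1) _ (by
          intro w
          rw [PySem.Dict.getD_insert]
          by_cases hw : w = v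
          · subst hw; simp [List.count_append]
          · rw [if_neg hw, hd w]
            simp [List.count_append, Ne.symm hw])

-- Boyer-Moore invariant
def InvBM (p : List Int) (cand : Option Int) (cnt : Int) : Prop :=
  0 ≤ cnt ∧ (cand = none → p = []) ∧
  ∀ x : Int, 2 * (p.count x : Int) ≤ (p.length : Int) + (if cand = some x then cnt else -cnt)

theorem count_app_single (p : List Int) (v x : Int) :
    (((p ++ [v]).count x : Int)) = (p.count x : Int) + (if x = v then 1 else 0) := by
  by_cases h : x = v
  · subst h; simp [List.count_append]
  · simp [List.count_append, Ne.symm h, h]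

theorem bmGo_inv (l : List Int) : ∀ (p : List Int) (cand : Option Int) (cnt : Int),
    InvBM p cand cnt →
    InvBM (p ++ l) (bmGo l (cand, cnt)).1 (bmGo l (cand, cnt)).2 := by
  induction l with
  | nil => intro p cand cnt h; simpa [bmGo] using h
  | cons v rest ih =>
      intro p cand cnt h
      obtain ⟨hcnt, hnone, hcount⟩ := h
      have hassoc : p ++ v :: rest = (p ++ [v]) ++ rest := by simp
      rw [hassoc]
      have hlen : (((p ++ [v]).length : Int)) = (p.length : Int) + 1 := by simp
      by_cases h0 : cnt = 0
      · subst h0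
        have hbase : ∀ x : Int, 2 * ((p.count x : Int)) ≤ (p.length : Int) := by
          intro x; have := hcount x; split at this <;> omega
        simp only [bmGo]
        refine ih (p ++ [v]) (some v) 1 ⟨by omega, by simp, ?_⟩
        intro x
        rw [count_app_single, hlen]
        have := hbase x
        by_cases hx : x = v
        · subst hx; rw [if_pos rfl, if_pos rfl]; omega
        · rw [if_neg hx, if_neg (by simp [Ne.symm hx])]; omega
      · simp only [bmGo, if_neg h0]
        by_cases hv : some v = cand
        · simp only [if_pos hv]
          refine ih (p ++ [v]) cand (cnt + 1)
            ⟨by omega, by intro hcn; rw [hcn] at hv; simp at hv, ?_⟩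
          intro x
          rw [count_app_single, hlen]
          have := hcount x
          by_cases hx : cand = some x
          · have hxv : x = v := by rw [← hv] at hx; exact (Option.some.inj hx).symm
            rw [if_pos hx] at this ⊢
            rw [if_pos hxv]; omega
          · have hxv : x ≠ v := by intro h'; subst h'; exact hx hv.symm
            rw [if_neg hx] at this ⊢
            rw [if_neg hxv]; omega
        · simp only [if_neg hv]
          refine ih (p ++ [v]) cand (cnt - 1) ⟨?_, ?_, ?_⟩
          · by_cases hcn : ∃ c, cand = some c
            · -- cnt can only be 0 when cand is none; here just need cnt - 1 ≥ 0:
              -- from the invariant at the candidate c: 2*count c p ≤ len + cnt, always true;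
              -- 0 ≤ cnt - 1 because cnt ≠ 0 and 0 ≤ cnt
              omega
            · omega
          · intro hcn
            exfalso
            have := hcount v
            rw [hcn] at this
            simp only [reduceCtorEq, if_false] at this
            have : (0:Int) ≤ (p.count v : Int) := by positivity
            have h2 := hcount v
            rw [hcn] at h2
            simp only [reduceCtorEq, if_false] at h2
            have hple : (0:Int) ≤ (p.length : Int) := by positivity
            have hp0 : p = [] := hnone hcn
            subst hp0
            simp at h2
            omega
          · intro x
            rw [count_app_single, hlen]
            have := hcount x
            by_cases hx : cand = some x
            · have hxv : x ≠ v := by intro h'; subst h'; exact hv hx.symm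
              rw [if_pos hx] at this ⊢
              rw [if_neg hxv]; omega
            · rw [if_neg hx] at this ⊢
              by_cases hxv : x = v
              · rw [if_pos hxv]; omega
              · rw [if_neg hxv]; omega

theorem bm_correct (A : List Int) (x : Int)
    (hx : 2 * (A.count x : Int) > (A.length : Int)) :
    (bmGo A (none, 0)).1 = some x := by
  have hinv : InvBM [] none 0 := ⟨le_refl _, fun _ => rfl, by intro y; simp⟩
  have h := bmGo_inv A [] none 0 hinv
  simp only [List.nil_append] at h
  obtain ⟨hcnt, hnone, hcount⟩ := h
  rcases hcand : (bmGo A (none, 0)).1 with _ | c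
  · rw [hcand] at hnone
    have hA : A = [] := hnone rfl
    subst hA
    simp at hx
  · rw [hcand] at hcount
    by_cases hcx : c = x
    · rw [hcx]
    · exfalso
      have := hcount x
      rw [if_neg (by simp [hcx])] at this
      have hlen : (A.count x : Int) ≤ (A.length : Int) := by
        exact_mod_cast List.count_le_length
      omega

-- two distinct dominators are impossible
theorem count_pair_le (A : List Int) (x y : Int) (hxy : x ≠ y) :
    A.count x + A.count y ≤ A.length := by
  induction A with
  | nil => simp
  | cons a rest ih =>
      rcases eq_or_ne a x with hax | hax
      · subst hax
        simp [hxy]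
        omega
      · rcases eq_or_ne a y with hay | hay
        · subst hay
          simp [hax]
          omega
        · simp [hax, hay]
          omega

-- no-dominator case: A's loop never fires
theorem specA_no_dom (n : Int) (A : List Int) (hn : n = (A.length : Int))
    (hno : ∀ x : Int, 2 * (A.count x : Int) ≤ n) :
    ∀ (l p : List Int) (i : Int), A = p ++ l → specA n l p i = -1 := by
  intro l
  induction l with
  | nil => intro p i _; rfl
  | cons v rest ih =>
      intro p i hA
      have hcv : p.count v + 1 ≤ A.count v := by
        rw [hA]; simp [List.count_append]
      have hfalse : ¬ (2 * ((p.count v : Int) + 1) > n) := by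
        have := hno v; push_cast at hcv ⊢; omega
      simp only [specA, if_neg hfalse]
      exact ih (p ++ [v]) (i + 1) (by simpa using hA)

-- dominator case: A's loop equals the candidate-only scan
theorem specA_eq_scan (n : Int) (A : List Int) (x : Int) (hn : n = (A.length : Int))
    (hx : 2 * (A.count x : Int) > n) :
    ∀ (l p : List Int) (i : Int), A = p ++ l → 2 * ((p.count x : Int)) ≤ n →
      specA n l p i = scanGo n x l i (p.count x : Int) := by
  intro l
  induction l with
  | nil => intro p i _ _; rfl
  | cons v rest ih =>
      intro p i hA hb
      by_cases hvx : v = x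
      · subst hvx
        simp only [specA, scanGo]
        by_cases hcond : 2 * ((p.count v : Int) + 1) > n
        · simp [hcond]
        · simp only [if_neg hcond]
          have := ih (p ++ [v]) (i + 1) (by simpa using hA) (by
            simp only [List.count_append, List.count_singleton]
            push_cast; omega)
          rw [this]
          congr 1
          simp [List.count_append]
      · have hvnot : ¬ (2 * ((p.count v : Int) + 1) > n) := by
          intro hc
          have hdomv : 2 * (A.count v : Int) > n := by
            have : p.count v + 1 ≤ A.count v := by
              rw [hA]; simp [List.count_append]
            push_cast at this; omega
          have hpair := count_pair_le A v x hvx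
          rw [hn] at hdomv hx
          omega
        simp only [specA, scanGo, if_neg hvnot, if_neg hvx]
        have := ih (p ++ [v]) (i + 1) (by simpa using hA) (by
          simp [List.count_append, hvx]; omega)
        rw [this]
        congr 1
        simp [List.count_append, hvx]

-- ===== VERDICT (by name: the statement is the Claim_ definition above) =====
theorem solution_spec : Claim_equal_solution := by
  intro A _
  unfold Spec_solution
  have hA : solution A = specA (A.length : Int) A [] 0 :=
    solutionGo_eq_specA _ _ _ _ _ (by intro v; simp)
  unfold solution_alt
  set n : Int := (A.length : Int) with hn
  match hcand : (bmGo A (none, 0)).1 with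
  | none =>
      have hno : ∀ x : Int, 2 * (A.count x : Int) ≤ n := by
        intro x
        by_contra h
        have := bm_correct A x (by omega)
        rw [hcand] at this; simp at this
      -- reduce the match on the known candidate
      simp only [hcand]
      rw [hA, specA_no_dom n A hn hno A [] 0 rfl]
  | some c =>
      -- reduce the match on the known candidate
      simp only [hcand]
      by_cases hver : 2 * (A.count c : Int) ≤ n
      · have hno : ∀ x : Int, 2 * (A.count x : Int) ≤ n := by
          intro x
          by_contra h
          have := bm_correct A x (by omega)
          rw [hcand] at this
          injection this with h'
          subst h'; omega
        rw [if_pos hver, hA, specA_no_dom n A hn hno A [] 0 rfl]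
      · rw [if_neg hver, hA]
        have := specA_eq_scan n A c hn (by omega) A [] 0 rfl
          (by simp; rw [hn]; positivity)
        simpa using this
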